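-- pv_equiv track=rewrite | github.com/tgmorton/subject-drop-rearing | scripts/generate_checkpoint_schedule.py | generate_log_steps
-- ===== SOURCE A (Python) =====
-- from typing import Dict, List, Set, Optional
--
-- def generate_log_steps(max_steps: int, first_epoch_only: bool = True) -> List[int]:
--     """
--     Generate log-based checkpoint steps.
--
--     Args:
--         max_steps: Maximum number of steps to generate up to
--         first_epoch_only: If True, only generate for the first epoch
--
--     Returns:
--         List of checkpoint steps
--     """
--     log_steps = []
--     step = 1
--
--     while step <= max_steps:
--         log_steps.append(step)
--         step *= 2
--
--         # If first_epoch_only, stop after the first epoch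
--         if first_epoch_only and step > max_steps // 20:  # Rough estimate of first epoch
--             break
--
--     return log_steps
-- ===== SOURCE B (Python) =====
-- from typing import List
--
--
-- def generate_log_steps(max_steps: int, first_epoch_only: bool = True) -> List[int]:
--     """Closed-form: derive the number of checkpoints from the bit length of the bound."""
--     if max_steps < 1:
--         return []
--     bound = max_steps // 20 if first_epoch_only else max_steps
--     n = max(1, bound.bit_length())
--     return [2 ** i for i in range(n)]
-- ===== Notes on version B (the rewrite author's own statement) =====
-- stated objective: simpler
-- what changed: Replaces the doubling while-loop with a break inside it by an arithmetic closed form: the output length is computed from the bound's bit_length and the list is produced as [2**i for i in range(n)].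
import Mathlib
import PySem

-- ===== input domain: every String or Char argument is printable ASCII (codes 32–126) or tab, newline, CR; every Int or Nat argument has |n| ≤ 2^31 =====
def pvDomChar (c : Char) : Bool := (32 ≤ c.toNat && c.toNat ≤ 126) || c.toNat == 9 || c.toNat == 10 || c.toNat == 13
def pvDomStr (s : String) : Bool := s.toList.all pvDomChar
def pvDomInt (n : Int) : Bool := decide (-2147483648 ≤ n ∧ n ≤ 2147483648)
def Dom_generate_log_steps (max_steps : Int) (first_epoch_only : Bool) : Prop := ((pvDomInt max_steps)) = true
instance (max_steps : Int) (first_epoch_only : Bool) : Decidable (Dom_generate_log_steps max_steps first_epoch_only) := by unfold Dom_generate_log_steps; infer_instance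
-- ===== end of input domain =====

-- B replaces A's doubling while-loop (with its mid-loop break) by a closed form: the
-- output length is max(1, bound.bit_length()) and the list is [2**i for i in range(n)].

-- ===== PORT A =====
-- the while-loop of A; `step` starts at 1 and doubles, so we carry 1 ≤ step for termination
def pvLoopA (max_steps : Int) (feo : Bool) (step : Int) (hs : 1 ≤ step) (acc : List Int) : List Int :=
  if h : step ≤ max_steps then
    if feo = true ∧ PySem.Int.floordiv max_steps 20 < step * 2 then
      acc ++ [step]
    else
      pvLoopA max_steps feo (step * 2) (by omega) (acc ++ [step])
  else acc
termination_by (max_steps + 1 - step).toNat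
decreasing_by omega

def generate_log_steps (max_steps : Int) (first_epoch_only : Bool) : List Int :=
  pvLoopA max_steps first_epoch_only 1 (by norm_num) []

-- ===== PORT B =====
def generate_log_steps_alt (max_steps : Int) (first_epoch_only : Bool) : List Int :=
  if max_steps < 1 then []
  else
    let bound := if first_epoch_only then PySem.Int.floordiv max_steps 20 else max_steps
    let n := max 1 (PySem.Int.bitLength bound)
    (List.range n).map (fun i => (2 : Int) ^ i)

-- ===== PRECONDITION & SPEC =====
def Spec_generate_log_steps (max_steps : Int) (first_epoch_only : Bool) (out : List Int) : Prop := out = generate_log_steps_alt max_steps first_epoch_only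
instance (max_steps : Int) (first_epoch_only : Bool) (out : List Int) : Decidable (Spec_generate_log_steps max_steps first_epoch_only out) := by unfold Spec_generate_log_steps; infer_instance

-- ===== CLAIM (what is proved, stated in full; the proofs are below) =====
def Claim_equal_generate_log_steps : Prop := ∀ (max_steps : Int) (first_epoch_only : Bool), Dom_generate_log_steps max_steps first_epoch_only → Spec_generate_log_steps max_steps first_epoch_only (generate_log_steps max_steps first_epoch_only)

-- ===== LEMMAS AND PROOFS =====

-- the effective bound and output length B computes
def pvB (ms : Int) (feo : Bool) : Int := if feo then PySem.Int.floordiv ms 20 else ms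
def pvN (ms : Int) (feo : Bool) : Nat := max 1 (PySem.Int.bitLength (pvB ms feo))

lemma pow_le_iff_lt_bitLength (b : Int) (hb : 0 ≤ b) (k : Nat) :
    (2 : Int) ^ k ≤ b ↔ k < PySem.Int.bitLength b := by
  rcases eq_or_lt_of_le hb with h0 | h0
  · simp only [← h0, PySem.Int.bitLength_zero]
    constructor
    · intro h
      have := pow_pos (show (0:Int) < 2 by norm_num) k
      omega
    · omega
  · have habs : b = (b.natAbs : Int) := (Int.natAbs_of_nonneg hb).symm
    constructor
    · intro h
      have h' : 2 ^ k ≤ b.natAbs := by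
        rw [habs] at h; exact_mod_cast h
      have hlt := PySem.Int.lt_two_pow_bitLength b
      have : (2:Nat) ^ k < 2 ^ PySem.Int.bitLength b := lt_of_le_of_lt h' hlt
      exact (Nat.pow_lt_pow_iff_right (by norm_num)).mp this
    · intro h
      have hne : b ≠ 0 := by omega
      have hle := PySem.Int.two_pow_bitLength_le b hne
      have h' : (2:Nat) ^ k ≤ 2 ^ (PySem.Int.bitLength b - 1) :=
        Nat.pow_le_pow_right (by norm_num) (by omega)
      have : (2:Nat) ^ k ≤ b.natAbs := le_trans h' hle
      rw [habs]; exact_mod_cast this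

lemma pvB_nonneg (ms : Int) (feo : Bool) (hms : 1 ≤ ms) : 0 ≤ pvB ms feo := by
  unfold pvB
  split
  · rw [PySem.Int.floordiv_eq_ediv_of_pos (by norm_num : (0:Int) < 20)]
    exact Int.ediv_nonneg (by omega) (by norm_num)
  · omega

lemma pvB_le (ms : Int) (feo : Bool) (hms : 1 ≤ ms) : pvB ms feo ≤ ms := by
  have h0 := pvB_nonneg ms feo hms
  unfold pvB at *
  split at h0 <;> rename_i hf
  · simp only [hf, if_true]
    have : pvB ms feo * 20 ≤ ms := by
      have := (PySem.Int.le_floordiv_iff_mul_le (a := ms) (b := 20) (q := PySem.Int.floordiv ms 20) (by norm_num)).mp le_rfl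
      simpa [pvB, hf] using this
    simp only [pvB, hf, if_true] at this h0
    nlinarith
  · simp [hf]

lemma pvN_pos_eq (ms : Int) (feo : Bool) (hms : 1 ≤ ms) (hfeo : feo = false) :
    pvN ms feo = PySem.Int.bitLength ms := by
  have h1 : 0 < PySem.Int.bitLength ms :=
    (pow_le_iff_lt_bitLength ms (by omega) 0).mp (by norm_num; omega)
  simp [pvN, pvB, hfeo]
  omega

-- step = 2^j entering the loop with j < pvN gives the rest of B's list
lemma pvLoopA_eq (ms : Int) (feo : Bool) (hms : 1 ≤ ms) :
    ∀ d j (step : Int) (hst : step = 2 ^ j) (hs : 1 ≤ step) (acc : List Int),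
      pvN ms feo - j = d → j < pvN ms feo →
      pvLoopA ms feo step hs acc =
        acc ++ (List.range' j (pvN ms feo - j)).map (fun i => (2 : Int) ^ i) := by
  intro d
  induction d with
  | zero => intro j step hst hs acc hd hj; omega
  | succ e ih =>
    intro j step hst hs acc hd hj
    have hb0 := pvB_nonneg ms feo hms
    have hbms := pvB_le ms feo hms
    -- 2^j ≤ ms
    have hpow : step ≤ ms := by
      rcases Nat.eq_zero_or_pos j with hj0 | hj0
      · subst hj0; simp at hst; omega
      · have hjL : j < PySem.Int.bitLength (pvB ms feo) := by
          have := hj; unfold pvN at this; omega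
        have : (2:Int) ^ j ≤ pvB ms feo := (pow_le_iff_lt_bitLength _ hb0 j).mpr hjL
        omega
    rw [pvLoopA.eq_def, dif_pos hpow]
    by_cases hbr : feo = true ∧ PySem.Int.floordiv ms 20 < step * 2
    · rw [if_pos hbr]
      obtain ⟨hf, hlt⟩ := hbr
      have hlt' : pvB ms feo < 2 ^ (j + 1) := by
        simp only [pvB, hf, if_true]
        rw [hst] at hlt; rw [pow_succ]; linarith
      have hnle : ¬ (j + 1 < PySem.Int.bitLength (pvB ms feo)) := by
        intro hc
        have := (pow_le_iff_lt_bitLength _ hb0 (j+1)).mpr hc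
        omega
      have hn1 : pvN ms feo = j + 1 := by unfold pvN at *; omega
      rw [hn1]
      simp [hst, List.range'_succ]
    · rw [if_neg hbr]
      by_cases hjn : j + 1 < pvN ms feo
      · rw [ih (j+1) (step * 2) (by rw [hst, pow_succ]) (by omega) _ (by omega) hjn]
        have hnj : pvN ms feo - j = (pvN ms feo - (j+1)) + 1 := by omega
        rw [hnj, List.range'_succ]
        simp [hst]
      · -- j + 1 = pvN; only reachable with feo = false, and the next call exits at once
        have hn1 : pvN ms feo = j + 1 := by omega
        have hf : feo = false := by
          cases feo
          · rfl
          · exfalso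
            have hge : (2:Int) ^ (j+1) ≤ pvB ms true := by
              push_neg at hbr
              have h2 := hbr rfl
              rw [hst] at h2
              simpa [pvB, pow_succ] using h2
            have : j + 1 < PySem.Int.bitLength (pvB ms true) :=
              (pow_le_iff_lt_bitLength _ hb0 (j+1)).mp hge
            unfold pvN at hn1; omega
        have hgt : ¬ (step * 2 ≤ ms) := by
          intro hc
          have : (2:Int) ^ (j+1) ≤ ms := by rw [pow_succ]; rw [hst] at hc; linarith
          have hlt : j + 1 < PySem.Int.bitLength ms :=
            (pow_le_iff_lt_bitLength ms (by omega) (j+1)).mp this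
          rw [pvN_pos_eq ms feo hms hf] at hn1; omega
        rw [pvLoopA.eq_def, dif_neg hgt]
        rw [hn1]
        simp [hst, List.range'_succ]

-- ===== VERDICT (by name: the statement is the Claim_ definition above) =====
theorem generate_log_steps_spec : Claim_equal_generate_log_steps := by
  intro ms feo _
  unfold Spec_generate_log_steps generate_log_steps generate_log_steps_alt
  by_cases hms : ms < 1
  · rw [pvLoopA.eq_def, dif_neg (by omega), if_pos hms]
  · push_neg at hms
    rw [if_neg (by omega)]
    have hn : 0 < pvN ms feo := by unfold pvN; omega
    rw [pvLoopA_eq ms feo hms (pvN ms feo) 0 1 (by norm_num) (by norm_num) []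
        (by omega) hn]
    simp [pvN, pvB, List.range_eq_range']
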